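-- pv_equiv track=rewrite | github.com/EltonC06/FlyFood-pisi2 | algoritmo-genetico.py | calcular_custo_rota
-- ===== SOURCE A (Python) =====
-- def calcular_custo_rota(rota, pontos, inicio='R'):
--     """Calcula o custo total (Distância de Manhattan) de uma rota."""
--     if not rota:
--         return 0
--     # Distância da origem ao primeiro ponto
--     dist = abs(pontos[inicio]['linha'] - pontos[rota[0]]['linha']) + \
--            abs(pontos[inicio]['coluna'] - pontos[rota[0]]['coluna'])
--
--     # Distância entre os pontos da rota
--     for i in range(len(rota) - 1):
--         ponto_atual = pontos[rota[i]]
--         proximo_ponto = pontos[rota[i+1]]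
--         dist += abs(ponto_atual['linha'] - proximo_ponto['linha']) + \
--                 abs(ponto_atual['coluna'] - proximo_ponto['coluna'])
--
--     # Distância do último ponto de volta à origem
--     dist += abs(pontos[rota[-1]]['linha'] - pontos[inicio]['linha']) + \
--             abs(pontos[rota[-1]]['coluna'] - pontos[inicio]['coluna'])
--     return dist
-- ===== SOURCE B (Python) =====
-- def calcular_custo_rota(rota, pontos, inicio='R'):
--     """Calcula o custo total (Distância de Manhattan) de uma rota."""
--     if not rota:
--         return 0
--     seq = [inicio] + list(rota) + [inicio]
--
--     def dist(a, b):
--         pa, pb = pontos[a], pontos[b]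
--         return abs(pa['linha'] - pb['linha']) + abs(pa['coluna'] - pb['coluna'])
--
--     def custo_segmento(lo, hi):
--         # soma das arestas consecutivas de seq[lo..hi], por divisao e conquista
--         if hi - lo < 1:
--             return 0
--         if hi - lo == 1:
--             return dist(seq[lo], seq[hi])
--         mid = (lo + hi) // 2
--         return custo_segmento(lo, mid) + custo_segmento(mid, hi)
--
--     return custo_segmento(0, len(seq) - 1)
-- ===== Notes on version B (the rewrite author's own statement) =====
-- stated objective: alternative
-- what changed: Replaces A's linear indexed loop with three special-cased segments by a divide-and-conquer recursion: the cyclic sequence [inicio]+rota+[inicio] is split at a midpoint and the edge costs of the two halves are summed recursively (correct because edge-cost is additive over a split of consecutive pairs).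
import Mathlib
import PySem

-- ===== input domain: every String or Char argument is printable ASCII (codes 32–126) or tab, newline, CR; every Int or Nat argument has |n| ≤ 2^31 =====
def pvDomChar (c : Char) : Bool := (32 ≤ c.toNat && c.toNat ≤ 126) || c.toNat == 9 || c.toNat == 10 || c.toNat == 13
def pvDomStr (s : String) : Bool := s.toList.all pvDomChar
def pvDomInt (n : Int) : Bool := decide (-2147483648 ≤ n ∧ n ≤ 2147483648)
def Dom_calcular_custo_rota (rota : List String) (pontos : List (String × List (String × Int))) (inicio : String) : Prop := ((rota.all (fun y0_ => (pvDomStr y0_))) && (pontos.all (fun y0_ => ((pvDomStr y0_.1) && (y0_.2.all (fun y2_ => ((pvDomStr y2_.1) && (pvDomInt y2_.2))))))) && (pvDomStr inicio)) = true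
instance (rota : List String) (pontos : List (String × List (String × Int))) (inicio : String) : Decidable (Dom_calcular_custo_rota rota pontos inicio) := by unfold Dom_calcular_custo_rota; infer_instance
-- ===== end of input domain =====

-- B replaces A's linear indexed loop (with origin legs special-cased) by a
-- divide-and-conquer recursion over the cyclic sequence [inicio]+rota+[inicio]
-- (objective: alternative decomposition, same O(n) cost).


-- shared lookup helper: pontos[k]['linha'/'coluna'] (first-match dict lookup; default 0
-- is only reached outside Pre_, where the Python raises KeyError)
def pvCoord (pontos : List (String × List (String × Int))) (k c : String) : Int :=
  ((PySem.Dict.mk (((PySem.Dict.mk pontos).get? k).getD [])).get? c).getD 0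

-- ===== PORT A =====
def calcular_custo_rota (rota : List String) (pontos : List (String × List (String × Int))) (inicio : String) : Int :=
  if rota = [] then 0
  else
    -- dist = |linha(inicio) - linha(rota[0])| + |coluna(inicio) - coluna(rota[0])|
    let dist : Int :=
      |pvCoord pontos inicio "linha" - pvCoord pontos (PySem.List.pyGetD rota 0 "") "linha"| +
      |pvCoord pontos inicio "coluna" - pvCoord pontos (PySem.List.pyGetD rota 0 "") "coluna"|
    -- for i in range(len(rota) - 1): dist += ...
    let dist : Int :=
      (PySem.List.pyRange 0 ((rota.length : Int) - 1) 1).foldl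
        (fun acc i =>
          acc + (|pvCoord pontos (PySem.List.pyGetD rota i "") "linha" -
                  pvCoord pontos (PySem.List.pyGetD rota (i + 1) "") "linha"| +
                 |pvCoord pontos (PySem.List.pyGetD rota i "") "coluna" -
                  pvCoord pontos (PySem.List.pyGetD rota (i + 1) "") "coluna"|)) dist
    -- dist += |linha(rota[-1]) - linha(inicio)| + |coluna(rota[-1]) - coluna(inicio)|
    dist + (|pvCoord pontos (PySem.List.pyGetD rota (-1) "") "linha" - pvCoord pontos inicio "linha"| +
            |pvCoord pontos (PySem.List.pyGetD rota (-1) "") "coluna" - pvCoord pontos inicio "coluna"|)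

-- ===== PORT B =====
-- dist(a, b): Manhattan distance between named points (Source B's inner 'dist')
def pvDist (pontos : List (String × List (String × Int))) (a b : String) : Int :=
  let pa := ((PySem.Dict.mk pontos).get? a).getD []
  let pb := ((PySem.Dict.mk pontos).get? b).getD []
  |((PySem.Dict.mk pa).get? "linha").getD 0 - ((PySem.Dict.mk pb).get? "linha").getD 0| +
  |((PySem.Dict.mk pa).get? "coluna").getD 0 - ((PySem.Dict.mk pb).get? "coluna").getD 0|

-- custo_segmento(lo, hi): divide-and-conquer edge cost of seq[lo..hi]
def pvSeg (pontos : List (String × List (String × Int))) (seq : List String) (lo hi : Int) : Int :=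
  if hi - lo < 1 then 0
  else if hi - lo = 1 then
    pvDist pontos (PySem.List.pyGetD seq lo "") (PySem.List.pyGetD seq hi "")
  else
    let mid := PySem.Int.floordiv (lo + hi) 2
    pvSeg pontos seq lo mid + pvSeg pontos seq mid hi
termination_by (hi - lo).toNat
decreasing_by
  · have hm : PySem.Int.floordiv (lo + hi) 2 = (lo + hi) / 2 :=
      PySem.Int.floordiv_eq_ediv_of_pos (by omega)
    simp only [hm]; omega
  · have hm : PySem.Int.floordiv (lo + hi) 2 = (lo + hi) / 2 :=
      PySem.Int.floordiv_eq_ediv_of_pos (by omega)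
    simp only [hm]; omega

def calcular_custo_rota_alt (rota : List String) (pontos : List (String × List (String × Int))) (inicio : String) : Int :=
  if rota = [] then 0
  else
    let seq := inicio :: (rota ++ [inicio])
    pvSeg pontos seq 0 ((seq.length : Int) - 1)

-- ===== PRECONDITION & SPEC =====
-- Pre_ excludes exactly the inputs where the Python A raises KeyError: a nonempty rota
-- containing (or an inicio) not present in pontos, or a point missing 'linha'/'coluna'.
def Pre_calcular_custo_rota (rota : List String) (pontos : List (String × List (String × Int))) (inicio : String) : Prop :=
  rota = [] ∨
    ((inicio :: rota).all (fun k =>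
      match (PySem.Dict.mk pontos).get? k with
      | some p => (PySem.Dict.mk p).contains "linha" && (PySem.Dict.mk p).contains "coluna"
      | none => false)) = true
instance (rota : List String) (pontos : List (String × List (String × Int))) (inicio : String) : Decidable (Pre_calcular_custo_rota rota pontos inicio) := by unfold Pre_calcular_custo_rota; infer_instance

def pvWitness_calcular_custo_rota : List String × (List (String × List (String × Int))) × String :=
  (["A", "B"],
   [("R", [("linha", 0), ("coluna", 0)]),
    ("A", [("linha", 3), ("coluna", 1)]),
    ("B", [("linha", -2), ("coluna", 5)])],
   "R")

def Spec_calcular_custo_rota (rota : List String) (pontos : List (String × List (String × Int))) (inicio : String) (out : Int) : Prop := out = calcular_custo_rota_alt rota pontos inicio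
instance (rota : List String) (pontos : List (String × List (String × Int))) (inicio : String) (out : Int) : Decidable (Spec_calcular_custo_rota rota pontos inicio out) := by unfold Spec_calcular_custo_rota; infer_instance

-- ===== CLAIM (what is proved, stated in full; the proofs are below) =====
def Claim_equal_calcular_custo_rota : Prop := ∀ (rota : List String) (pontos : List (String × List (String × Int))) (inicio : String), Dom_calcular_custo_rota rota pontos inicio → Pre_calcular_custo_rota rota pontos inicio → Spec_calcular_custo_rota rota pontos inicio (calcular_custo_rota rota pontos inicio)

-- ===== LEMMAS AND PROOFS =====

-- sum of g over consecutive pairs of x :: ys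
def pvAdjSum (g : String → String → Int) : String → List String → Int
  | _, [] => 0
  | x, y :: ys => g x y + pvAdjSum g y ys

theorem pvAdjSum_append (g : String → String → Int) :
    ∀ (x : String) (ys : List String) (z : String),
      pvAdjSum g x (ys ++ [z]) =
        pvAdjSum g x ys + g ((x :: ys).getLast (by simp)) z := by
  intro x ys z
  induction ys generalizing x with
  | nil => simp [pvAdjSum]
  | cons y rest ih =>
    simp only [List.cons_append, pvAdjSum, ih y, add_assoc]
    congr 1

-- linear reference: sum of pvDist over n consecutive pairs of seq starting at lo
def pvPairSum (pontos : List (String × List (String × Int))) (seq : List String) : Nat → Nat → Int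
  | _, 0 => 0
  | lo, n + 1 =>
      pvDist pontos (seq.getD lo "") (seq.getD (lo + 1) "") + pvPairSum pontos seq (lo + 1) n

theorem pvPairSum_add (pontos : List (String × List (String × Int))) (seq : List String) :
    ∀ (m n lo : Nat),
      pvPairSum pontos seq lo (m + n) = pvPairSum pontos seq lo m + pvPairSum pontos seq (lo + m) n := by
  intro m
  induction m with
  | zero => intro n lo; simp [pvPairSum]
  | succ m ih =>
    intro n lo
    have h : m + 1 + n = (m + n) + 1 := by omega
    rw [h]
    simp only [pvPairSum, ih n (lo + 1)]
    have h2 : lo + 1 + m = lo + (m + 1) := by omega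
    rw [h2, add_assoc]

theorem pvPairSum_shift (pontos : List (String × List (String × Int))) (x : String) (seq : List String) :
    ∀ (n lo : Nat), pvPairSum pontos (x :: seq) (lo + 1) n = pvPairSum pontos seq lo n := by
  intro n
  induction n with
  | zero => intro lo; simp [pvPairSum]
  | succ n ih =>
    intro lo
    simp only [pvPairSum, List.getD_cons_succ, ih (lo + 1)]

theorem pvPairSum_adj (pontos : List (String × List (String × Int))) :
    ∀ (ys : List String) (x : String),
      pvPairSum pontos (x :: ys) 0 ys.length = pvAdjSum (pvDist pontos) x ys := by
  intro ys
  induction ys with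
  | nil => intro x; simp [pvPairSum, pvAdjSum]
  | cons y rest ih =>
    intro x
    simp only [List.length_cons, pvPairSum, List.getD_cons_zero, List.getD_cons_succ, pvAdjSum]
    rw [show (0 + 1 : Nat) = 0 + 1 from rfl, pvPairSum_shift pontos x (y :: rest) rest.length 0, ih y]

theorem pvSeg_eq (pontos : List (String × List (String × Int))) (seq : List String) :
    ∀ (n : Nat) (lo hi : Int), 0 ≤ lo → hi - lo = (n : Int) →
      pvSeg pontos seq lo hi = pvPairSum pontos seq lo.toNat n := by
  intro n
  induction n using Nat.strong_induction_on with
  | _ n ih =>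
    intro lo hi hlo hn
    match n with
    | 0 =>
      rw [pvSeg, if_pos (by omega)]
      simp [pvPairSum]
    | 1 =>
      rw [pvSeg, if_neg (by omega), if_pos (by omega)]
      have hlo' : lo = ((lo.toNat : Nat) : Int) := by omega
      have hhi' : hi = (((lo.toNat + 1 : Nat)) : Int) := by push_cast; omega
      rw [hlo', hhi', PySem.List.pyGetD_natCast, PySem.List.pyGetD_natCast]
      simp [pvPairSum]
      rw [show (max lo 0).toNat = lo.toNat from by omega]
    | (m + 2) =>
      rw [pvSeg, if_neg (by push_cast at hn; omega), if_neg (by push_cast at hn; omega)]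
      have hm : PySem.Int.floordiv (lo + hi) 2 = (lo + hi) / 2 :=
        PySem.Int.floordiv_eq_ediv_of_pos (by omega)
      set mid := (lo + hi) / 2 with hmid
      show pvSeg pontos seq lo (PySem.Int.floordiv (lo + hi) 2) +
            pvSeg pontos seq (PySem.Int.floordiv (lo + hi) 2) hi = pvPairSum pontos seq lo.toNat (m + 2)
      rw [hm]
      have hb1 : lo < mid := by omega
      have hb2 : mid < hi := by omega
      have e1 := ih (mid - lo).toNat (by omega) lo mid hlo (by omega)
      have e2 := ih (hi - mid).toNat (by omega) mid hi (by omega) (by omega)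
      rw [e1, e2]
      have hsplit : (mid - lo).toNat + (hi - mid).toNat = m + 2 := by omega
      have hmid' : lo.toNat + (mid - lo).toNat = mid.toNat := by omega
      rw [← hsplit, pvPairSum_add pontos seq (mid - lo).toNat (hi - mid).toNat lo.toNat, hmid']

-- middle-loop characterisation for port A
theorem pvMidFold (g : String → String → Int) :
    ∀ (ys : List String) (x : String) (c : Int),
      (List.range ys.length).foldl
        (fun (acc : Int) (k : Nat) => acc + g (PySem.List.pyGetD (x :: ys) (k : Int) "")
                            (PySem.List.pyGetD (x :: ys) ((k : Int) + 1) "")) c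
        = c + pvAdjSum g x ys := by
  intro ys
  induction ys with
  | nil => intro x c; simp [pvAdjSum]
  | cons y rest ih =>
    intro x c
    rw [List.length_cons, List.range_succ_eq_map]
    simp only [List.foldl_cons, List.foldl_map]
    have h00 : PySem.List.pyGetD (x :: y :: rest) ((0 : Nat) : Int) "" = x := by
      rw [PySem.List.pyGetD_natCast]; simp
    have h01 : PySem.List.pyGetD (x :: y :: rest) (((0 : Nat) : Int) + 1) "" = y := by
      have h : ((0 : Nat) : Int) + 1 = ((1 : Nat) : Int) := by norm_num
      rw [h, PySem.List.pyGetD_natCast]; simp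
    have hs1 : ∀ k : Nat,
        PySem.List.pyGetD (x :: y :: rest) ((Nat.succ k : Nat) : Int) "" =
          PySem.List.pyGetD (y :: rest) ((k : Nat) : Int) "" := by
      intro k
      rw [PySem.List.pyGetD_natCast, PySem.List.pyGetD_natCast]
      simp [Nat.succ_eq_add_one]
    have hs2 : ∀ k : Nat,
        PySem.List.pyGetD (x :: y :: rest) (((Nat.succ k : Nat) : Int) + 1) "" =
          PySem.List.pyGetD (y :: rest) (((k : Nat) : Int) + 1) "" := by
      intro k
      have h1 : ((Nat.succ k : Nat) : Int) + 1 = ((k + 2 : Nat) : Int) := by push_cast; ring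
      have h2 : ((k : Nat) : Int) + 1 = ((k + 1 : Nat) : Int) := by push_cast; ring
      rw [h1, h2, PySem.List.pyGetD_natCast, PySem.List.pyGetD_natCast]
      simp
    rw [h00, h01]
    have hc : (List.range rest.length).foldl
        (fun (acc : Int) (k : Nat) => acc + g (PySem.List.pyGetD (x :: y :: rest) ((Nat.succ k : Nat) : Int) "")
                            (PySem.List.pyGetD (x :: y :: rest) (((Nat.succ k : Nat) : Int) + 1) ""))
        (c + g x y)
        = (List.range rest.length).foldl
            (fun (acc : Int) (k : Nat) => acc + g (PySem.List.pyGetD (y :: rest) ((k : Nat) : Int) "")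
                                (PySem.List.pyGetD (y :: rest) (((k : Nat) : Int) + 1) ""))
            (c + g x y) := by
      apply PySem.List.foldl_congr_mem
      intro acc k _
      rw [hs1 k, hs2 k]
    rw [hc, ih y (c + g x y)]
    simp [pvAdjSum, add_assoc]

theorem pvMidFoldRange (g : String → String → Int) (ys : List String) (x : String) (c : Int) :
    (PySem.List.pyRange 0 (((x :: ys).length : Int) - 1) 1).foldl
      (fun acc i => acc + g (PySem.List.pyGetD (x :: ys) i "")
                          (PySem.List.pyGetD (x :: ys) (i + 1) "")) c
      = c + pvAdjSum g x ys := by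
  rw [PySem.List.pyRange_one]
  have hn : ((((x :: ys).length : Int) - 1) - 0).toNat = ys.length := by
    simp
  rw [hn, List.foldl_map]
  have hbody : ∀ (acc : Int) (k : Nat), k ∈ List.range ys.length →
      acc + g (PySem.List.pyGetD (x :: ys) ((0 : Int) + (k : Int)) "")
              (PySem.List.pyGetD (x :: ys) ((0 : Int) + (k : Int) + 1) "")
        = acc + g (PySem.List.pyGetD (x :: ys) (k : Int) "")
                  (PySem.List.pyGetD (x :: ys) ((k : Int) + 1) "") := by
    intro acc k _
    norm_num
  rw [PySem.List.foldl_congr_mem (List.range ys.length) _ _ c hbody]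
  exact pvMidFold g ys x c

-- ===== VERDICT (by name: the statement is the Claim_ definition above) =====
theorem calcular_custo_rota_spec : Claim_equal_calcular_custo_rota := by
  intro rota pontos inicio _ _
  unfold Spec_calcular_custo_rota calcular_custo_rota calcular_custo_rota_alt
  cases rota with
  | nil => simp
  | cons r0 rest =>
    simp only [if_neg (List.cons_ne_nil r0 rest)]
    -- B side: divide-and-conquer = linear pair sum = pvAdjSum over the cyclic sequence
    have hseqlen : (inicio :: ((r0 :: rest) ++ [inicio])).length = rest.length + 3 := by simp
    have hB : pvSeg pontos (inicio :: ((r0 :: rest) ++ [inicio])) 0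
          (((inicio :: ((r0 :: rest) ++ [inicio])).length : Int) - 1)
        = pvAdjSum (pvDist pontos) inicio ((r0 :: rest) ++ [inicio]) := by
      rw [pvSeg_eq pontos _ ((r0 :: rest) ++ [inicio]).length 0 _ (le_refl 0) (by simp)]
      simpa using pvPairSum_adj pontos ((r0 :: rest) ++ [inicio]) inicio
    rw [hB]
    -- A side
    show (PySem.List.pyRange 0 (((r0 :: rest).length : Int) - 1) 1).foldl
        (fun acc i => acc + pvDist pontos (PySem.List.pyGetD (r0 :: rest) i "")
                              (PySem.List.pyGetD (r0 :: rest) (i + 1) ""))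
        (pvDist pontos inicio (PySem.List.pyGetD (r0 :: rest) 0 ""))
      + pvDist pontos (PySem.List.pyGetD (r0 :: rest) (-1) "") inicio
      = pvAdjSum (pvDist pontos) inicio ((r0 :: rest) ++ [inicio])
    have h0 : PySem.List.pyGetD (r0 :: rest) 0 "" = r0 := by
      simp [PySem.List.pyGetD_zero]
    have hneg : PySem.List.pyGetD (r0 :: rest) (-1) "" = (r0 :: rest).getLast (by simp) :=
      PySem.List.pyGetD_neg_one _ "" (List.cons_ne_nil r0 rest)
    rw [h0, hneg, pvMidFoldRange (pvDist pontos) rest r0 (pvDist pontos inicio r0),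
        pvAdjSum_append (pvDist pontos) inicio (r0 :: rest) inicio]
    have hlast : (inicio :: r0 :: rest).getLast (by simp) = (r0 :: rest).getLast (by simp) := by
      rw [List.getLast_cons]
    rw [hlast]
    show pvDist pontos inicio r0 + pvAdjSum (pvDist pontos) r0 rest + _
        = pvDist pontos inicio r0 + pvAdjSum (pvDist pontos) r0 rest + _
    rfl
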